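-- pv_equiv track=rewrite | github.com/s-ilya/yandex-praktikum-algorithms | sprint_2/a_photocopies.py | get_max_photos_to_backup
-- ===== SOURCE A (Python) =====
-- def get_max_photos_to_backup(capacities: list) -> int:
--     non_empty_capacities = list(filter(lambda n: n > 0, capacities))
--
--     if len(non_empty_capacities) <= 1:
--         return 0
--
--     sorted_capacities = sorted(non_empty_capacities)
--     stored_photos = 0
--
--     while len(sorted_capacities) > 1:
--         stored_photos += 1
--         sorted_capacities[0] -= 1
--         sorted_capacities[-1] -= 1
--
--         if sorted_capacities[0] == 0:
--             sorted_capacities.pop(0)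
--
--         if sorted_capacities[-1] == 0:
--             sorted_capacities.pop()
--
--         sorted_capacities.sort()
--
--     return stored_photos
-- ===== SOURCE B (Python) =====
-- def get_max_photos_to_backup(capacities: list) -> int:
--     positive = [c for c in capacities if c > 0]
--     if not positive:
--         return 0
--     total = sum(positive)
--     return min(total // 2, total - max(positive))
-- ===== Notes on version B (the rewrite author's own statement) =====
-- stated objective: faster
-- what changed: Replaced the step-by-step simulation (decrement min and max, pop empties, re-sort every iteration) by the closed form min(sum//2, sum-max) over the positive capacities.
import Mathlib
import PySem

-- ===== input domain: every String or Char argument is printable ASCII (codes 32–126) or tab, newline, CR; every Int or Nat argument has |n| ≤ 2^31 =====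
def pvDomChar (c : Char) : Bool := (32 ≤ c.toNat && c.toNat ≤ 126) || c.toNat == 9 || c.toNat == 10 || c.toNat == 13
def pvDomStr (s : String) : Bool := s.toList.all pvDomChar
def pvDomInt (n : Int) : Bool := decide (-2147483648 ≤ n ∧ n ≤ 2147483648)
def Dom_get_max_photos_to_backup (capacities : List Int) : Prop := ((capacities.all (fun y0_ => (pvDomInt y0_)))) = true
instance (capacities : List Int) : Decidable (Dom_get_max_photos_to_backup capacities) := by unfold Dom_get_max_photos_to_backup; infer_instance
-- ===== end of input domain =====

-- B replaces A's simulation loop (decrement min & max, pop empties, re-sort each step)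
-- by the closed form min(sum//2, sum-max) over the positive capacities: O(n) instead of O(S·n log n).

-- ===== PORT A =====
-- `sorted_capacities[-1] -= 1`: decrement the last element
def pvDecLast : List Int → List Int
  | [] => []
  | [x] => [x - 1]
  | x :: y :: t => x :: pvDecLast (y :: t)

-- the while-loop; fuel bounds the iteration count (each step lowers the total by 2);
-- the `len(...) > 1` test is transcribed as the pattern split on the first two elements
def pvLoopA : Nat → List Int → Int → Int
  | 0, _, cnt => cnt
  | _ + 1, [], cnt => cnt
  | _ + 1, [_], cnt => cnt
  | fuel + 1, a :: y :: t, cnt =>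
    let rest := y :: t
    let l1 := (a - 1) :: pvDecLast rest
    let l2 := if a - 1 = 0 then l1.tail else l1
    let l3 := if l2.getLast? = some 0 then l2.dropLast else l2
    pvLoopA fuel (PySem.List.sorted l3 (fun x => x) false) (cnt + 1)

def get_max_photos_to_backup (capacities : List Int) : Int :=
  let non_empty_capacities := capacities.filter (fun n => decide (0 < n))
  if non_empty_capacities.length ≤ 1 then 0
  else
    pvLoopA non_empty_capacities.sum.toNat
      (PySem.List.sorted non_empty_capacities (fun x => x) false) 0

-- ===== PORT B =====
def get_max_photos_to_backup_alt (capacities : List Int) : Int :=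
  let positive := capacities.filter (fun c => decide (0 < c))
  match PySem.List.max? positive (fun x => x) with
  | none => 0
  | some m =>
    let total := positive.sum
    min (PySem.Int.floordiv total 2) (total - m)

-- ===== PRECONDITION & SPEC =====
def Spec_get_max_photos_to_backup (capacities : List Int) (out : Int) : Prop := out = get_max_photos_to_backup_alt capacities
instance (capacities : List Int) (out : Int) : Decidable (Spec_get_max_photos_to_backup capacities out) := by unfold Spec_get_max_photos_to_backup; infer_instance

-- ===== CLAIM (what is proved, stated in full; the proofs are below) =====
def Claim_equal_get_max_photos_to_backup : Prop := ∀ (capacities : List Int), Dom_get_max_photos_to_backup capacities → Spec_get_max_photos_to_backup capacities (get_max_photos_to_backup capacities)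

-- ===== LEMMAS AND PROOFS =====

-- max of a list, default 0
def pvMx (l : List Int) : Int := l.foldr max 0

-- the closed-form value (proof-side mirror of B)
def pvF (l : List Int) : Int := min (l.sum / 2) (l.sum - pvMx l)

theorem pvMx_nonneg (l : List Int) : 0 ≤ pvMx l := by
  induction l with
  | nil => simp [pvMx]
  | cons x t ih => simpa [pvMx] using Or.inr ih

theorem pvMx_ge (l : List Int) {x : Int} (hx : x ∈ l) : x ≤ pvMx l := by
  induction l with
  | nil => cases hx
  | cons y t ih =>
    simp only [List.mem_cons] at hx
    rcases hx with rfl | hx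
    · simp [pvMx]
    · exact le_trans (ih hx) (by simp [pvMx])

theorem pvMx_le (l : List Int) {b : Int} (hb : 0 ≤ b) (h : ∀ x ∈ l, x ≤ b) : pvMx l ≤ b := by
  induction l with
  | nil => simpa [pvMx]
  | cons y t ih =>
    simp only [pvMx, List.foldr_cons, max_le_iff]
    exact ⟨h y (by simp), ih (fun x hx => h x (by simp [hx]))⟩

theorem pvMx_eq_of_max (l : List Int) {b : Int} (hb : 0 ≤ b) (hmem : b ∈ l)
    (h : ∀ x ∈ l, x ≤ b) : pvMx l = b :=
  le_antisymm (pvMx_le l hb h) (pvMx_ge l hmem)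

theorem pvMx_append (xs ys : List Int) : pvMx (xs ++ ys) = max (pvMx xs) (pvMx ys) := by
  induction xs with
  | nil =>
    show pvMx ys = max (pvMx []) (pvMx ys)
    rw [show pvMx ([] : List Int) = 0 from rfl, max_eq_right (pvMx_nonneg ys)]
  | cons x t ih =>
    show max x (pvMx (t ++ ys)) = max (max x (pvMx t)) (pvMx ys)
    rw [ih, max_assoc]

theorem pvMx_perm {l l' : List Int} (h : l.Perm l') : pvMx l = pvMx l' :=
  List.Perm.foldr_eq h 0

theorem pvMx_cons_zero (t : List Int) : pvMx (0 :: t) = pvMx t := by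
  show max 0 (pvMx t) = pvMx t
  exact max_eq_right (pvMx_nonneg t)

theorem pvF_perm {l l' : List Int} (h : l.Perm l') : pvF l = pvF l' := by
  simp [pvF, h.sum_eq, pvMx_perm h]

theorem pvDecLast_concat (ys : List Int) (b : Int) :
    pvDecLast (ys ++ [b]) = ys ++ [b - 1] := by
  induction ys with
  | nil => rfl
  | cons x t ih =>
    cases t with
    | nil => simp [pvDecLast]
    | cons y u => simpa [pvDecLast] using ih

theorem pvLen_le_sum (l : List Int) (h : ∀ x ∈ l, 1 ≤ x) : (l.length : Int) ≤ l.sum := by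
  induction l with
  | nil => simp
  | cons x t ih =>
    have h1 := ih (fun y hy => h y (by simp [hy]))
    have h2 := h x (by simp)
    simp only [List.length_cons, List.sum_cons]
    push_cast
    omega

theorem pvFoldlMax (t : List Int) (p : Int) (hp : 0 ≤ p) :
    t.foldl max p = max p (pvMx t) := by
  induction t generalizing p with
  | nil => simp [pvMx, hp]
  | cons x u ih =>
    simp only [List.foldl_cons, pvMx, List.foldr_cons]
    rw [ih (max p x) (le_trans hp (le_max_left _ _)), max_assoc]
    rfl

-- the core arithmetic step: decrementing the head and the last of a sorted
-- positive list lowers the closed-form value by exactly 1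
theorem pvF_step (a b : Int) (ys : List Int)
    (ha : 1 ≤ a) (hb : 1 ≤ b) (hab : a ≤ b)
    (hys1 : ∀ x ∈ ys, 1 ≤ x) (hysb : ∀ x ∈ ys, x ≤ b) :
    pvF ((a - 1) :: (ys ++ [b - 1])) = pvF (a :: (ys ++ [b])) - 1 := by
  have hk0 : 0 ≤ pvMx ys := pvMx_nonneg ys
  have hkb : pvMx ys ≤ b := pvMx_le ys (by omega) hysb
  have hmxl : pvMx (a :: (ys ++ [b])) = b := by
    apply pvMx_eq_of_max _ (by omega) (by simp)
    intro x hx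
    rcases (by simpa using hx : x = a ∨ x ∈ ys ∨ x = b) with rfl | hx | rfl
    · exact hab
    · exact hysb x hx
    · exact le_refl _
  have hsum : ((a - 1) :: (ys ++ [b - 1])).sum = (a :: (ys ++ [b])).sum - 2 := by
    simp; ring
  have hmx' : pvMx ((a - 1) :: (ys ++ [b - 1]))
      = max (a - 1) (max (pvMx ys) (b - 1)) := by
    have : pvMx ((a - 1) :: (ys ++ [b - 1])) = max (a - 1) (pvMx (ys ++ [b - 1])) := by
      simp [pvMx, List.foldr_cons]
    rw [this, pvMx_append]
    have : pvMx [b - 1] = b - 1 := by simp [pvMx]; omega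
    rw [this]
  set s := (a :: (ys ++ [b])).sum with hs
  by_cases hcase : pvMx ys ≤ b - 1
  · -- new max is b - 1
    have hm : pvMx ((a - 1) :: (ys ++ [b - 1])) = b - 1 := by
      rw [hmx']; omega
    simp only [pvF, hsum, hm, hmxl, ← hs]
    simp only [min_def]
    split_ifs <;> omega
  · -- pvMx ys = b : a second copy of the max exists, so s ≥ 2b + 1
    have hkb' : pvMx ys = b := by omega
    have hbys : b ∈ ys := by
      rcases ys with _ | ⟨y, u⟩
      · simp [pvMx] at hkb'; omega
      · have : pvMx (y :: u) ∈ (y :: u) ∨ pvMx (y :: u) = 0 := by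
          clear hkb' hcase hysb hys1
          induction (y :: u) with
          | nil => simp [pvMx]
          | cons z w ih =>
            simp only [pvMx, List.foldr_cons]
            rcases le_total z (w.foldr max 0) with h | h
            · rw [max_eq_right h]
              rcases ih with h' | h'
              · exact Or.inl (List.mem_cons_of_mem _ h')
              · exact Or.inr h'
            · rw [max_eq_left h]; exact Or.inl (List.mem_cons_self)
        rcases this with h | h
        · rwa [hkb'] at h
        · rw [h] at hkb'; omega
    have hys_sum : b ≤ ys.sum := by
      apply List.single_le_sum _ _ hbys
      intro x hx; exact le_trans (by omega) (hys1 x hx)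
    have hslb : 2 * b + 1 ≤ s := by
      simp only [hs, List.sum_cons, List.sum_append, List.sum_cons, List.sum_nil]
      omega
    have hm : pvMx ((a - 1) :: (ys ++ [b - 1])) = b := by
      rw [hmx']; omega
    simp only [pvF, hsum, hm, hmxl, ← hs]
    simp only [min_def]
    split_ifs <;> omega

-- dropping a trailing zero changes neither sum nor max
theorem pvF_concat_zero (ys : List Int) : pvF (ys ++ [0]) = pvF ys := by
  have h1 : (ys ++ [0]).sum = ys.sum := by simp
  have h2 : pvMx (ys ++ [0]) = pvMx ys := by
    rw [pvMx_append, show pvMx [(0 : Int)] = 0 from rfl]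
    exact max_eq_left (pvMx_nonneg ys)
  simp [pvF, h1, h2]

theorem pvF_cons_zero (t : List Int) : pvF (0 :: t) = pvF t := by
  simp [pvF, pvMx_cons_zero]

theorem pvLoop_invariant :
    ∀ (fuel : Nat) (l : List Int) (cnt : Int),
      l.Pairwise (· ≤ ·) → (∀ x ∈ l, 1 ≤ x) → l.sum.toNat ≤ fuel →
      pvLoopA fuel l cnt = cnt + pvF l := by
  intro fuel
  induction fuel with
  | zero =>
    intro l cnt _ h1 hfuel
    cases l with
    | nil => simp [pvLoopA, pvF, pvMx]
    | cons x t =>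
      exfalso
      have hlen := pvLen_le_sum (x :: t) h1
      simp only [List.length_cons] at hlen
      omega
  | succ fuel ih =>
    intro l cnt hsort h1 hfuel
    match l with
    | [] => simp [pvLoopA, pvF, pvMx]
    | [x] =>
      have hx : 1 ≤ x := h1 x (by simp)
      have hF : pvF [x] = 0 := by
        simp only [pvF, pvMx, List.foldr_cons, List.foldr_nil, List.sum_cons, List.sum_nil,
          add_zero]
        rw [max_eq_left (by omega), show x - x = 0 by ring,
          min_eq_right (by omega : (0 : Int) ≤ x / 2)]
      rw [hF, pvLoopA]; ring
    | a :: y :: t =>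
      obtain ⟨ys, b, hconcat⟩ : ∃ ys b, y :: t = ys ++ [b] := by
        rcases (List.eq_nil_or_concat (y :: t)).resolve_left (by simp) with ⟨ys, b, h⟩
        exact ⟨ys, b, by rw [h, List.concat_eq_append]⟩
      -- ordering facts
      have ha1 : 1 ≤ a := h1 a (by simp)
      have hb1 : 1 ≤ b := by
        apply h1 b; rw [List.mem_cons, hconcat]; simp
      have hys1 : ∀ x ∈ ys, 1 ≤ x := by
        intro x hx; apply h1 x; rw [List.mem_cons, hconcat]; simp [hx]
      have hpw := hsort
      rw [List.pairwise_cons, hconcat] at hpw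
      have hab : a ≤ b := hpw.1 b (by simp)
      have hysb : ∀ x ∈ ys, x ≤ b := by
        have := hpw.2
        rw [List.pairwise_append] at this
        intro x hx
        exact this.2.2 x hx b (by simp)
      have hsuml : 2 ≤ (a :: (ys ++ [b])).sum := by
        have hlb := pvLen_le_sum (a :: (ys ++ [b]))
          (by intro x hx
              simp at hx
              rcases hx with rfl | hx | rfl
              · exact ha1
              · exact hys1 x hx
              · exact hb1)
        simp only [List.length_cons, List.length_append] at hlb
        push_cast at hlb
        omega
      have hfuel' : (a :: (ys ++ [b])).sum.toNat ≤ fuel + 1 := by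
        rw [show a :: (ys ++ [b]) = a :: y :: t by rw [hconcat]]
        exact hfuel
      -- one common finisher for the four pop-shapes of the iteration
      have key : ∀ l3 : List Int, (∀ x ∈ l3, 1 ≤ x) →
          l3.sum = (a :: (ys ++ [b])).sum - 2 →
          pvF l3 = pvF ((a - 1) :: (ys ++ [b - 1])) →
          pvLoopA fuel (PySem.List.sorted l3 (fun x => x) false) (cnt + 1)
            = cnt + pvF (a :: (ys ++ [b])) := by
        intro l3 hmem3 hsum3 hF3
        have hperm := PySem.List.sorted_perm l3 (fun x : Int => x) false
        rw [ih (PySem.List.sorted l3 (fun x : Int => x) false) (cnt + 1)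
          (by simpa using PySem.List.sorted_pairwise l3 (fun x : Int => x))
          (by intro x hx
              apply hmem3 x
              simpa [PySem.List.mem_sorted] using hx)
          (by rw [hperm.sum_eq, hsum3]; omega)]
        rw [pvF_perm hperm, hF3, pvF_step a b ys ha1 hb1 hab hys1 hysb]
        ring
      -- unfold one iteration
      simp only [pvLoopA]
      rw [show pvDecLast (y :: t) = ys ++ [b - 1] by rw [hconcat, pvDecLast_concat],
        show pvF (a :: (y :: t)) = pvF (a :: (ys ++ [b])) by rw [hconcat]]
      by_cases hz1 : a - 1 = 0
      · simp only [hz1, if_pos, List.tail_cons]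
        have hlast : (ys ++ [b - 1]).getLast? = some (b - 1) := by
          rw [List.getLast?_concat]
        rw [hlast]
        by_cases hz2 : b - 1 = 0
        · rw [if_pos (by rw [hz2]), List.dropLast_concat]
          apply key ys hys1
          · simp only [List.sum_cons, List.sum_append, List.sum_nil]
            omega
          · calc pvF ys = pvF (ys ++ [0]) := (pvF_concat_zero ys).symm
              _ = pvF (ys ++ [b - 1]) := by rw [hz2]
              _ = pvF (0 :: (ys ++ [b - 1])) := (pvF_cons_zero _).symm
              _ = pvF ((a - 1) :: (ys ++ [b - 1])) := by rw [hz1]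
        · rw [if_neg (by simpa using hz2)]
          apply key (ys ++ [b - 1])
          · intro x hx
            simp at hx
            rcases hx with hx | rfl
            · exact hys1 x hx
            · omega
          · simp only [List.sum_cons, List.sum_append, List.sum_nil]
            omega
          · calc pvF (ys ++ [b - 1]) = pvF (0 :: (ys ++ [b - 1])) := (pvF_cons_zero _).symm
              _ = pvF ((a - 1) :: (ys ++ [b - 1])) := by rw [hz1]
      · simp only [hz1, if_neg, not_false_iff]
        have hlast : ((a - 1) :: (ys ++ [b - 1])).getLast? = some (b - 1) := by
          rw [show (a - 1) :: (ys ++ [b - 1]) = ((a - 1) :: ys) ++ [b - 1] by simp,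
            List.getLast?_concat]
        rw [hlast]
        by_cases hz2 : b - 1 = 0
        · rw [if_pos (by rw [hz2]),
            show (a - 1) :: (ys ++ [b - 1]) = ((a - 1) :: ys) ++ [b - 1] by simp,
            List.dropLast_concat]
          apply key ((a - 1) :: ys)
          · intro x hx
            simp only [List.mem_cons] at hx
            rcases hx with rfl | hx
            · omega
            · exact hys1 x hx
          · simp only [List.sum_cons, List.sum_append, List.sum_nil]
            omega
          · calc pvF ((a - 1) :: ys) = pvF (((a - 1) :: ys) ++ [0]) :=
                (pvF_concat_zero _).symm
              _ = pvF ((a - 1) :: (ys ++ [b - 1])) := by rw [← hz2]; simp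
        · rw [if_neg (by simpa using hz2)]
          apply key ((a - 1) :: (ys ++ [b - 1]))
          · intro x hx
            simp at hx
            rcases hx with rfl | hx | rfl
            · omega
            · exact hys1 x hx
            · omega
          · simp only [List.sum_cons, List.sum_append, List.sum_nil]
            omega
          · rfl

-- B computes pvF of the positive sublist
theorem pvAlt_general (pos : List Int) (hp1 : ∀ x ∈ pos, 1 ≤ x) :
    (match PySem.List.max? pos (fun x => x) with
     | none => (0 : Int)
     | some m => min (PySem.Int.floordiv pos.sum 2) (pos.sum - m)) = pvF pos := by
  cases pos with
  | nil => simp [PySem.List.max?, pvF, pvMx]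
  | cons p t =>
    simp only [PySem.List.max?_id_cons]
    have hp : 0 ≤ p := le_trans (by omega) (hp1 p (by simp))
    rw [pvFoldlMax t p hp]
    have hmax : max p (pvMx t) = pvMx (p :: t) := by simp [pvMx]
    rw [hmax, pvF,
      PySem.Int.floordiv_eq_ediv_of_pos (by norm_num : (0:Int) < 2)]

theorem pvAlt_eq_F (capacities : List Int) :
    get_max_photos_to_backup_alt capacities
      = pvF (capacities.filter (fun c => decide (0 < c))) := by
  have hp1 : ∀ x ∈ capacities.filter (fun c => decide (0 < c)), 1 ≤ x := by
    intro x hx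
    have := List.of_mem_filter hx
    simp at this
    omega
  exact pvAlt_general _ hp1

-- ===== VERDICT (by name: the statement is the Claim_ definition above) =====
theorem get_max_photos_to_backup_spec : Claim_equal_get_max_photos_to_backup := by
  intro capacities _
  unfold Spec_get_max_photos_to_backup
  rw [pvAlt_eq_F]
  unfold get_max_photos_to_backup
  set pos := capacities.filter (fun n => decide (0 < n)) with hpos
  have hp1 : ∀ x ∈ pos, 1 ≤ x := by
    intro x hx
    rw [hpos] at hx
    have := List.of_mem_filter hx
    simp at this
    omega
  by_cases hlen : pos.length ≤ 1
  · simp only [hlen, if_pos]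
    match pos, hlen, hp1 with
    | [], _, _ => simp [pvF, pvMx]
    | [x], _, hp1 =>
      have hx : 1 ≤ x := hp1 x (by simp)
      have hF : pvF [x] = 0 := by
        simp only [pvF, pvMx, List.foldr_cons, List.foldr_nil, List.sum_cons, List.sum_nil,
          add_zero]
        rw [max_eq_left (by omega), show x - x = 0 by ring,
          min_eq_right (by omega : (0 : Int) ≤ x / 2)]
      simp [hF]
  · simp only [hlen, if_neg, not_false_iff]
    have hperm := PySem.List.sorted_perm pos (fun x : Int => x) false
    rw [pvLoop_invariant pos.sum.toNat
      (PySem.List.sorted pos (fun x : Int => x) false) 0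
      (by simpa using PySem.List.sorted_pairwise pos (fun x : Int => x))
      (by intro x hx
          apply hp1 x
          simpa [PySem.List.mem_sorted] using hx)
      (by rw [hperm.sum_eq])]
    rw [pvF_perm hperm]
    ring
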